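-- pv_equiv track=rewrite | github.com/hbhatnagar777/test-repo-3 | 08-nov/automation/Automation/AutomationUtils/commonutils.py | get_dictionary_difference
-- ===== SOURCE A (Python) =====
-- def get_dictionary_difference(dict1, dict2):
--     """Gets the difference between the two dictionaries provided
--
--         Args:
--             dict1       (dict)      Dictionary 1 to compare
--             dict2       (dict)      Dictionary 2 to compare
--
--         Returns:
--             added       (set)       Keys which are present in dict 1 but not in dict 2
--             removed     (set)       Keys which are present in dict 2 but not in dict 1
--             modified    (dict)      Keys which are present in both dict 1 and 2 but with
--                                     modified values.
--
--     """
--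
--     if not isinstance(dict1, dict) or not isinstance(dict2, dict):
--         raise Exception('Cannot get difference as one of them is not a dictionary')
--
--     d1_keys = set(dict1.keys())
--     d2_keys = set(dict2.keys())
--     intersect_keys = d1_keys.intersection(d2_keys)
--     added = d1_keys - d2_keys
--     removed = d2_keys - d1_keys
--     modified = {}
--
--     for o in intersect_keys:
--         if dict1[o] != dict2[o]:
--             modified[o] = (dict1[o], dict2[o])
--
--     return added, removed, modified
-- ===== SOURCE B (Python) =====
-- def get_dictionary_difference(dict1, dict2):
--     """Merge both dicts into one table of (left, right) value slots, then read
--     added/removed/modified off that single table with comprehensions."""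
--     if not isinstance(dict1, dict) or not isinstance(dict2, dict):
--         raise Exception('Cannot get difference as one of them is not a dictionary')
--
--     _MISSING = object()
--     merged = {key: (value, _MISSING) for key, value in dict1.items()}
--     for key, value in dict2.items():
--         merged[key] = (merged[key][0] if key in merged else _MISSING, value)
--
--     added = {key for key, (left, right) in merged.items() if right is _MISSING}
--     removed = {key for key, (left, right) in merged.items() if left is _MISSING}
--     modified = {key: (left, right) for key, (left, right) in merged.items()
--                 if left is not _MISSING and right is not _MISSING and left != right}
--     return added, removed, modified
-- ===== Notes on version B (the rewrite author's own statement) =====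
-- stated objective: alternative
-- what changed: Instead of computing three set-algebra differences/intersections over the key sets, B first merges both dicts into ONE table mapping each key to a (left, right) pair of value slots with a _MISSING sentinel, and then derives added/removed/modified by reading that merged table with three comprehensions.
import Mathlib
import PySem

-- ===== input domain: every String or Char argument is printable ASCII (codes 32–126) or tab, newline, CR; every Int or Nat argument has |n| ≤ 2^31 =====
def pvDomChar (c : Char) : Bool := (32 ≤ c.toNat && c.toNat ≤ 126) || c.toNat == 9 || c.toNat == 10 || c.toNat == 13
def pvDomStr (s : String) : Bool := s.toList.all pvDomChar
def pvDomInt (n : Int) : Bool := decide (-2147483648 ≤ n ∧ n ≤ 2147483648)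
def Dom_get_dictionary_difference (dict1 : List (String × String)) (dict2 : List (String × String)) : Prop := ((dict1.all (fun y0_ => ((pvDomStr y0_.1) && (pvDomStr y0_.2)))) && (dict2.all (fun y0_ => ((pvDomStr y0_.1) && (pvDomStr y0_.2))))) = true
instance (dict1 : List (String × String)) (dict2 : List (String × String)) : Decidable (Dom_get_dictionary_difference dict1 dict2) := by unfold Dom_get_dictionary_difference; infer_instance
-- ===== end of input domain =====

-- ===== PORT A =====
-- B replaces A's three set-algebra operations by one merged (left,right)-slot table read off by
-- comprehensions; alternative decomposition, same cost, same return value.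
def get_dictionary_difference (dict1 : List (String × String)) (dict2 : List (String × String)) : List String × List String × (List (String × String × String)) :=
  let d1 : PySem.Dict String String := PySem.Dict.ofList dict1
  let d2 : PySem.Dict String String := PySem.Dict.ofList dict2
  let d1_keys : PySem.Set String := PySem.Set.ofList d1.keys
  let d2_keys : PySem.Set String := PySem.Set.ofList d2.keys
  let intersect_keys : PySem.Set String := PySem.Set.inter d1_keys d2_keys
  let added : PySem.Set String := PySem.Set.diff d1_keys d2_keys
  let removed : PySem.Set String := PySem.Set.diff d2_keys d1_keys
  let modified : PySem.Dict String (String × String) :=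
    intersect_keys.foldl
      (fun m o => if d1.getD o "" ≠ d2.getD o "" then m.insert o (d1.getD o "", d2.getD o "") else m)
      PySem.Dict.empty
  (added, removed, modified.items)

-- ===== PORT B =====
def get_dictionary_difference_alt (dict1 : List (String × String)) (dict2 : List (String × String)) : List String × List String × (List (String × String × String)) :=
  let d1 : PySem.Dict String String := PySem.Dict.ofList dict1
  let d2 : PySem.Dict String String := PySem.Dict.ofList dict2
  -- merged = {key: (value, _MISSING) for key, value in dict1.items()}  ('none' models the _MISSING sentinel)
  let merged0 : PySem.Dict String (Option String × Option String) :=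
    PySem.Dict.ofList (d1.items.map (fun kv => (kv.1, (some kv.2, none))))
  -- for key, value in dict2.items(): merged[key] = (merged[key][0] if key in merged else _MISSING, value)
  let merged : PySem.Dict String (Option String × Option String) :=
    d2.items.foldl
      (fun m kv =>
        m.insert kv.1 ((if m.contains kv.1 then (m.getD kv.1 (none, none)).1 else none), some kv.2))
      merged0
  -- added = {key for key, (left, right) in merged.items() if right is _MISSING}
  let added : PySem.Set String :=
    PySem.Set.ofList ((merged.items.filter (fun kp => kp.2.2.isNone)).map (·.1))
  -- removed = {key for key, (left, right) in merged.items() if left is _MISSING}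
  let removed : PySem.Set String :=
    PySem.Set.ofList ((merged.items.filter (fun kp => kp.2.1.isNone)).map (·.1))
  -- modified = {key: (left, right) for ... if left/right present and left != right}
  let modified : PySem.Dict String (String × String) :=
    PySem.Dict.ofList
      ((merged.items.filter
          (fun kp => kp.2.1.isSome && kp.2.2.isSome && (kp.2.1 != kp.2.2))).map
        (fun kp => (kp.1, (kp.2.1.getD "", kp.2.2.getD ""))))
  (added, removed, modified.items)

-- ===== PRECONDITION & SPEC =====
def Spec_get_dictionary_difference (dict1 : List (String × String)) (dict2 : List (String × String)) (out : List String × List String × (List (String × String × String))) : Prop := out = get_dictionary_difference_alt dict1 dict2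
instance (dict1 : List (String × String)) (dict2 : List (String × String)) (out : List String × List String × (List (String × String × String))) : Decidable (Spec_get_dictionary_difference dict1 dict2 out) := by unfold Spec_get_dictionary_difference; infer_instance

-- ===== CLAIM (what is proved, stated in full; the proofs are below) =====
def Claim_equal_get_dictionary_difference : Prop := ∀ (dict1 : List (String × String)) (dict2 : List (String × String)), Dom_get_dictionary_difference dict1 dict2 → Spec_get_dictionary_difference dict1 dict2 (get_dictionary_difference dict1 dict2)

-- ===== LEMMAS AND PROOFS =====

-- first-match value lookup in an association list (the shape PySem.Dict.get? has on d.items)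
def pvLook (L : List (String × String)) (k : String) : Option String :=
  Option.map (fun x => x.2) (L.find? (fun p => p.1 == k))

theorem pvLook_items (d : PySem.Dict String String) (k : String) :
    pvLook d.items k = d.get? k := rfl

theorem pv_items_ofList {ν : Type} (L : List (String × ν)) (h : (L.map Prod.fst).Nodup) :
    (PySem.Dict.ofList L).items = L := by
  have h1 : PySem.Dict.ofList L
      = List.foldl (fun (d : PySem.Dict String ν) (a : String × ν) => d.insert a.1 a.2)
          PySem.Dict.empty L := rfl
  rw [h1, PySem.Dict.items_foldl_insert_fresh L Prod.fst Prod.snd PySem.Dict.empty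
    (by intro a _; simp [PySem.Dict.contains_empty]) h]
  show PySem.Dict.empty.items ++ _ = _
  simp [PySem.Dict.empty]

-- the merging loop of B: every key of m gets its right slot filled from L, the fresh keys of L append
theorem pv_merge_items (L : List (String × String))
    (m : PySem.Dict String (Option String × Option String))
    (hm : m.keys.Nodup) (hL : (L.map Prod.fst).Nodup) :
    (L.foldl (fun m kv =>
        m.insert kv.1 ((if m.contains kv.1 then (m.getD kv.1 (none, none)).1 else none), some kv.2)) m).items
    = m.items.map (fun p => match pvLook L p.1 with
        | some v => (p.1, (p.2.1, some v))
        | none => p)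
      ++ (L.filter (fun kv => !m.contains kv.1)).map
          (fun kv => (kv.1, ((none : Option String), some kv.2))) := by
  induction L generalizing m with
  | nil => simp [pvLook]
  | cons kv rest ih =>
    have hkm : kv.1 ∉ rest.map Prod.fst := (List.nodup_cons.mp hL).1
    have hrest : (rest.map Prod.fst).Nodup := (List.nodup_cons.mp hL).2
    have hlookrest : pvLook rest kv.1 = none := by
      unfold pvLook
      rw [List.find?_eq_none.mpr]
      · rfl
      · intro x hx hbeq
        exact hkm (List.mem_map.mpr ⟨x, hx, eq_of_beq hbeq⟩)
    by_cases hc : m.contains kv.1 = true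
    · -- the key is already in the table: its right slot is overwritten in place
      have hbody : m.insert kv.1 ((if m.contains kv.1 then (m.getD kv.1 (none, none)).1 else none), some kv.2)
          = m.insert kv.1 ((m.getD kv.1 (none, none)).1, some kv.2) := by rw [hc]; simp
      rw [List.foldl_cons, hbody]
      set m' := m.insert kv.1 ((m.getD kv.1 (none, none)).1, some kv.2) with hm'
      have hkeys' : m'.keys = m.keys := PySem.Dict.keys_insert_of_contains m _ hc
      have hnod' : m'.keys.Nodup := hkeys' ▸ hm
      rw [ih m' hnod' hrest]
      have hitems' : m'.items
          = m.items.map (fun p => if (p.1 == kv.1) = true then (kv.1, ((m.getD kv.1 (none, none)).1, some kv.2)) else p) :=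
        PySem.Dict.items_insert_of_contains m _ hc
      have hfilter : rest.filter (fun kv' => !m'.contains kv'.1)
          = rest.filter (fun kv' => !m.contains kv'.1) := by
        apply List.filter_congr
        intro x hx
        have hxne : x.1 ≠ kv.1 := by
          intro hxe
          exact hkm (hxe ▸ List.mem_map.mpr ⟨x, hx, rfl⟩)
        rw [hm', PySem.Dict.contains_insert]
        simp [hxne]
      have hrhsfilter : (kv :: rest).filter (fun kv' => !m.contains kv'.1)
          = rest.filter (fun kv' => !m.contains kv'.1) := by
        rw [List.filter_cons, hc]
        simp
      rw [hfilter, hrhsfilter, hitems', List.map_map]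
      congr 1
      apply List.map_congr_left
      intro p hp
      have hgd : m.get? p.1 = some p.2 := by
        have : (p.1, p.2) ∈ m.items := by simpa using hp
        exact PySem.Dict.get?_of_mem_items m this hm
      by_cases hpk : (p.1 == kv.1) = true
      · have hpe : p.1 = kv.1 := eq_of_beq hpk
        have hget : m.getD kv.1 (none, none) = p.2 := by
          rw [PySem.Dict.getD_eq_get?_getD, ← hpe, hgd]
          rfl
        simp only [Function.comp, hpk, if_pos, hget]
        have hlcons : pvLook (kv :: rest) p.1 = some kv.2 := by
          unfold pvLook
          rw [List.find?_cons_of_pos]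
          · rfl
          · simp [hpe]
        rw [hlookrest, hlcons]
        simp [hpe]
      · have hlcons : pvLook (kv :: rest) p.1 = pvLook rest p.1 := by
          unfold pvLook
          rw [List.find?_cons_of_neg]
          simp
          intro h
          exact hpk (by simp [h])
        simp only [Function.comp, hpk, if_neg, Bool.not_eq_true]
        rw [hlcons]
    · -- fresh key: appended with an empty left slot
      have hc' : m.contains kv.1 = false := by simpa using hc
      have hbody : m.insert kv.1 ((if m.contains kv.1 then (m.getD kv.1 (none, none)).1 else none), some kv.2)
          = m.insert kv.1 (none, some kv.2) := by rw [hc']; simp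
      rw [List.foldl_cons, hbody]
      set m' := m.insert kv.1 ((none : Option String), some kv.2) with hm'
      have hitems' : m'.items = m.items ++ [(kv.1, ((none : Option String), some kv.2))] :=
        PySem.Dict.items_insert_of_not_contains m _ hc'
      have hkeys' : m'.keys = m.keys ++ [kv.1] := PySem.Dict.keys_insert_of_not_contains m _ hc'
      have hknotmem : kv.1 ∉ m.keys := by
        intro hmem
        rw [(PySem.Dict.contains_iff_mem_keys m kv.1).mpr hmem] at hc'
        exact absurd hc' (by simp)
      have hnod' : m'.keys.Nodup := by
        rw [hkeys', List.nodup_append]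
        refine ⟨hm, by simp, ?_⟩
        intro a ha b hb
        simp only [List.mem_singleton] at hb
        intro he
        exact hknotmem ((hb ▸ he) ▸ ha)
      rw [ih m' hnod' hrest]
      have hfilter : rest.filter (fun kv' => !m'.contains kv'.1)
          = rest.filter (fun kv' => !m.contains kv'.1) := by
        apply List.filter_congr
        intro x hx
        have hxne : x.1 ≠ kv.1 := by
          intro hxe
          exact hkm (hxe ▸ List.mem_map.mpr ⟨x, hx, rfl⟩)
        rw [hm', PySem.Dict.contains_insert]
        simp [hxne]
      have hrhsfilter : (kv :: rest).filter (fun kv' => !m.contains kv'.1)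
          = kv :: rest.filter (fun kv' => !m.contains kv'.1) := by
        rw [List.filter_cons, hc']
        simp
      rw [hfilter, hrhsfilter, hitems', List.map_append]
      have happ : List.map (fun p => match pvLook rest p.1 with
            | some v => (p.1, (p.2.1, some v))
            | none => p) [(kv.1, ((none : Option String), some kv.2))]
          = [(kv.1, ((none : Option String), some kv.2))] := by
        simp [hlookrest]
      rw [happ]
      have hmap : m.items.map (fun p => match pvLook rest p.1 with
            | some v => (p.1, (p.2.1, some v))
            | none => p)
          = m.items.map (fun p => match pvLook (kv :: rest) p.1 with
            | some v => (p.1, (p.2.1, some v))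
            | none => p) := by
        apply List.map_congr_left
        intro p hp
        have hpne : p.1 ≠ kv.1 := by
          intro hpe
          exact hknotmem (hpe ▸ List.mem_map.mpr ⟨p, hp, rfl⟩)
        have : pvLook (kv :: rest) p.1 = pvLook rest p.1 := by
          unfold pvLook
          rw [List.find?_cons_of_neg]
          simp only [beq_iff_eq]
          intro h
          exact hpne h.symm
        rw [this]
      rw [hmap]
      simp

theorem pv_contains_eq {d2 : List (String × String)} (x : String) :
    PySem.Set.contains (PySem.Set.ofList (PySem.Dict.ofList d2).keys) x
      = (PySem.Dict.ofList d2).contains x := by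
  rw [Bool.eq_iff_iff, PySem.Set.contains_iff, PySem.Set.mem_ofList,
    PySem.Dict.contains_iff_mem_keys]

-- the merged table of B, spelled out: left slots from dict1 (in dict1 order), fresh dict2 keys appended
theorem pv_merged_items (dict1 dict2 : List (String × String)) :
    ((PySem.Dict.ofList dict2).items.foldl
      (fun m kv =>
        m.insert kv.1 ((if m.contains kv.1 then (m.getD kv.1 (none, none)).1 else none), some kv.2))
      (PySem.Dict.ofList ((PySem.Dict.ofList dict1).items.map (fun kv => (kv.1, (some kv.2, none)))))).items
    = (PySem.Dict.ofList dict1).items.map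
        (fun kv => (kv.1, ((some kv.2 : Option String), (PySem.Dict.ofList dict2).get? kv.1)))
      ++ ((PySem.Dict.ofList dict2).items.filter
            (fun kv => !(PySem.Dict.ofList dict1).contains kv.1)).map
          (fun kv => (kv.1, ((none : Option String), some kv.2))) := by
  set d1 := PySem.Dict.ofList dict1 with hd1
  set d2 := PySem.Dict.ofList dict2 with hd2
  have hk1 : d1.keys.Nodup := PySem.Dict.nodup_keys_ofList dict1
  have hk2 : d2.keys.Nodup := PySem.Dict.nodup_keys_ofList dict2
  have h0nod : ((d1.items.map (fun kv => (kv.1, ((some kv.2 : Option String), (none : Option String))))).map Prod.fst).Nodup := by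
    rw [List.map_map]
    exact hk1
  have h0items : (PySem.Dict.ofList (d1.items.map (fun kv => (kv.1, ((some kv.2 : Option String), (none : Option String)))))).items
      = d1.items.map (fun kv => (kv.1, ((some kv.2 : Option String), (none : Option String)))) :=
    pv_items_ofList _ h0nod
  have h0contains : ∀ x, (PySem.Dict.ofList (d1.items.map (fun kv => (kv.1, ((some kv.2 : Option String), (none : Option String)))))).contains x
      = d1.contains x := by
    intro x
    show (PySem.Dict.ofList (d1.items.map (fun kv => (kv.1, ((some kv.2 : Option String), (none : Option String)))))).items.any (fun p => p.1 == x)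
      = d1.items.any (fun p => p.1 == x)
    rw [h0items, List.any_map]
    rfl
  rw [pv_merge_items d2.items _ (PySem.Dict.nodup_keys_ofList _) hk2]
  congr 1
  · rw [h0items, List.map_map]
    apply List.map_congr_left
    intro kv _
    show (match pvLook d2.items kv.1 with
      | some v => (kv.1, ((some kv.2 : Option String), some v))
      | none => (kv.1, ((some kv.2 : Option String), (none : Option String)))) = _
    rw [pvLook_items]
    cases d2.get? kv.1 <;> rfl
  · congr 1
    apply List.filter_congr
    intro kv _
    rw [h0contains]

theorem pv_alt_eq (dict1 dict2 : List (String × String)) :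
    get_dictionary_difference_alt dict1 dict2
    = ((PySem.Dict.ofList dict1).keys.filter (fun k => !(PySem.Dict.ofList dict2).contains k),
       (PySem.Dict.ofList dict2).keys.filter (fun k => !(PySem.Dict.ofList dict1).contains k),
       ((PySem.Dict.ofList dict1).items.filter
          (fun kv => ((PySem.Dict.ofList dict2).get? kv.1).isSome
            && (some kv.2 != (PySem.Dict.ofList dict2).get? kv.1))).map
        (fun kv => (kv.1, (kv.2, ((PySem.Dict.ofList dict2).get? kv.1).getD "")))) := by
  simp only [get_dictionary_difference_alt]
  rw [pv_merged_items]
  simp only [List.filter_append, List.filter_map, List.map_append, List.map_map]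
  simp [Function.comp_def]
  refine ⟨?_, ?_, ?_⟩
  · have hfun : (fun x : String × String => ((PySem.Dict.ofList dict2).get? x.1).isNone)
        = (fun x : String × String => !(PySem.Dict.ofList dict2).contains x.1) := by
      funext x
      rw [PySem.Dict.contains_eq_isSome_get?, Option.not_isSome]
    rw [hfun]
    have hmapf : List.map (fun x : String × String => x.1)
          (List.filter (fun x => !(PySem.Dict.ofList dict2).contains x.1) (PySem.Dict.ofList dict1).items)
        = List.filter (fun k => !(PySem.Dict.ofList dict2).contains k) (PySem.Dict.ofList dict1).keys := by
      show _ = List.filter _ (List.map (fun x => x.1) (PySem.Dict.ofList dict1).items)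
      rw [List.filter_map]
      rfl
    rw [hmapf]
    exact PySem.Set.ofList_eq_self_of_nodup _ ((PySem.Dict.nodup_keys_ofList dict1).filter _)
  · have hmapf : List.map (fun x : String × String => x.1)
          (List.filter (fun kv => !(PySem.Dict.ofList dict1).contains kv.1) (PySem.Dict.ofList dict2).items)
        = List.filter (fun k => !(PySem.Dict.ofList dict1).contains k) (PySem.Dict.ofList dict2).keys := by
      show _ = List.filter _ (List.map (fun x => x.1) (PySem.Dict.ofList dict2).items)
      rw [List.filter_map]
      rfl
    rw [hmapf]
    exact PySem.Set.ofList_eq_self_of_nodup _ ((PySem.Dict.nodup_keys_ofList dict2).filter _)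
  · apply pv_items_ofList
    rw [List.map_map]
    have hsub : (List.filter
          (fun x => ((PySem.Dict.ofList dict2).get? x.1).isSome && some x.2 != (PySem.Dict.ofList dict2).get? x.1)
          (PySem.Dict.ofList dict1).items).Sublist (PySem.Dict.ofList dict1).items :=
      List.filter_sublist
    have hk1' : (List.map (fun x : String × String => x.1) (PySem.Dict.ofList dict1).items).Nodup :=
      PySem.Dict.nodup_keys_ofList dict1
    exact ((hsub.map (fun x : String × String => x.1)).nodup hk1')

theorem pv_a_eq (dict1 dict2 : List (String × String)) :
    get_dictionary_difference dict1 dict2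
    = ((PySem.Dict.ofList dict1).keys.filter (fun k => !(PySem.Dict.ofList dict2).contains k),
       (PySem.Dict.ofList dict2).keys.filter (fun k => !(PySem.Dict.ofList dict1).contains k),
       ((PySem.Dict.ofList dict1).items.filter
          (fun kv => ((PySem.Dict.ofList dict2).get? kv.1).isSome
            && (some kv.2 != (PySem.Dict.ofList dict2).get? kv.1))).map
        (fun kv => (kv.1, (kv.2, ((PySem.Dict.ofList dict2).get? kv.1).getD "")))) := by
  simp only [get_dictionary_difference]
  set d1 := PySem.Dict.ofList dict1 with hd1
  set d2 := PySem.Dict.ofList dict2 with hd2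
  have hk1 : d1.keys.Nodup := PySem.Dict.nodup_keys_ofList dict1
  have hk2 : d2.keys.Nodup := PySem.Dict.nodup_keys_ofList dict2
  have hv1 : ∀ kv ∈ d1.items, d1.getD kv.1 "" = kv.2 := by
    intro kv hkv
    rw [PySem.Dict.getD_eq_get?_getD,
      PySem.Dict.get?_of_mem_items d1 (by simpa using hkv) hk1]
    rfl
  have eAdd : PySem.Set.diff (PySem.Set.ofList d1.keys) (PySem.Set.ofList d2.keys)
      = d1.keys.filter (fun k => !d2.contains k) := by
    show (PySem.Set.ofList d1.keys).filter (fun x => !PySem.Set.contains (PySem.Set.ofList d2.keys) x) = _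
    rw [PySem.Set.ofList_eq_self_of_nodup _ hk1]
    apply List.filter_congr
    intro x _
    rw [pv_contains_eq]
  have eRem : PySem.Set.diff (PySem.Set.ofList d2.keys) (PySem.Set.ofList d1.keys)
      = d2.keys.filter (fun k => !d1.contains k) := by
    show (PySem.Set.ofList d2.keys).filter (fun x => !PySem.Set.contains (PySem.Set.ofList d1.keys) x) = _
    rw [PySem.Set.ofList_eq_self_of_nodup _ hk2]
    apply List.filter_congr
    intro x _
    rw [pv_contains_eq]
  have eInter : PySem.Set.inter (PySem.Set.ofList d1.keys) (PySem.Set.ofList d2.keys)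
      = d1.keys.filter (fun k => d2.contains k) := by
    show (PySem.Set.ofList d1.keys).filter (fun x => PySem.Set.contains (PySem.Set.ofList d2.keys) x) = _
    rw [PySem.Set.ofList_eq_self_of_nodup _ hk1]
    apply List.filter_congr
    intro x _
    rw [pv_contains_eq]
  rw [eAdd, eRem, eInter]
  have hfold : (d1.keys.filter (fun k => d2.contains k)).foldl
        (fun m o => if d1.getD o "" ≠ d2.getD o "" then m.insert o (d1.getD o "", d2.getD o "") else m)
        PySem.Dict.empty
      = (d1.keys.filter (fun k => d2.contains k)).foldl
        (fun m o => if (fun o => decide (d1.getD o "" ≠ d2.getD o "")) o = true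
          then m.insert o (d1.getD o "", d2.getD o "") else m)
        PySem.Dict.empty := by
    have : (fun (m : PySem.Dict String (String × String)) o =>
          if d1.getD o "" ≠ d2.getD o "" then m.insert o (d1.getD o "", d2.getD o "") else m)
        = (fun m o => if (fun o => decide (d1.getD o "" ≠ d2.getD o "")) o = true
          then m.insert o (d1.getD o "", d2.getD o "") else m) := by
      funext m o
      by_cases h : d1.getD o "" = d2.getD o "" <;> simp [h]
    rw [this]
  rw [hfold, ← List.foldl_filter]
  rw [PySem.Dict.items_foldl_insert_fresh _ (fun o => o)
    (fun o => (d1.getD o "", d2.getD o "")) PySem.Dict.empty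
    (by intro a _; simp [PySem.Dict.contains_empty])
    (by rw [List.map_id']; exact (hk1.filter _).filter _)]
  show (_, _, PySem.Dict.empty.items ++ _) = (_, _, _)
  rw [List.filter_filter]
  refine congrArg₂ Prod.mk rfl (congrArg₂ Prod.mk rfl ?_)
  show PySem.Dict.empty.items ++ _ = _
  have hempty : PySem.Dict.empty.items = ([] : List (String × String × String)) := rfl
  rw [hempty, List.nil_append]
  have hKf : d1.keys.filter (fun o => decide (d1.getD o "" ≠ d2.getD o "") && d2.contains o)
      = (d1.items.filter (fun kv => decide (d1.getD kv.1 "" ≠ d2.getD kv.1 "") && d2.contains kv.1)).map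
        (fun x => x.1) := by
    show List.filter _ (List.map (fun x => x.1) d1.items) = _
    rw [List.filter_map]
    rfl
  rw [hKf, List.map_map]
  have hfc : d1.items.filter (fun kv => decide (d1.getD kv.1 "" ≠ d2.getD kv.1 "") && d2.contains kv.1)
      = d1.items.filter (fun kv => (d2.get? kv.1).isSome && (some kv.2 != d2.get? kv.1)) := by
    apply List.filter_congr
    intro kv hkv
    rw [PySem.Dict.contains_eq_isSome_get?]
    cases h2 : d2.get? kv.1 with
    | none => simp
    | some w =>
      have : d2.getD kv.1 "" = w := by rw [PySem.Dict.getD_eq_get?_getD, h2]; rfl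
      simp [this, hv1 kv hkv, bne]
      by_cases h : kv.2 = w <;> simp [h]
  rw [hfc]
  apply List.map_congr_left
  intro kv hkv
  have hmem : kv ∈ d1.items := List.mem_of_mem_filter hkv
  show (kv.1, (d1.getD kv.1 "", d2.getD kv.1 "")) = (kv.1, (kv.2, (d2.get? kv.1).getD ""))
  rw [hv1 kv hmem, PySem.Dict.getD_eq_get?_getD]

theorem get_dictionary_difference_eq (dict1 dict2 : List (String × String)) :
    get_dictionary_difference dict1 dict2 = get_dictionary_difference_alt dict1 dict2 := by
  rw [pv_a_eq, pv_alt_eq]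

-- ===== VERDICT (by name: the statement is the Claim_ definition above) =====
theorem get_dictionary_difference_spec : Claim_equal_get_dictionary_difference := by
  intro dict1 dict2 _
  unfold Spec_get_dictionary_difference
  exact get_dictionary_difference_eq dict1 dict2
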